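-- pv_equiv track=rewrite | github.com/Lv296TAQC/python_tasks | tasks/MOO554.py | task554
-- ===== SOURCE A (Python) =====
-- def task554( from_input ):
-- 	a = 0
-- 	b = 0
-- 	c = 0
-- 	key = 1
-- 	result = {}
-- 	for c in range( from_input ):
-- 		for b in range( c ):
-- 			for a in range ( b ):
-- 				if c**2 == a**2 + b**2:
-- 					result[key] = [a, b, c]
-- 					key += 1
-- 	return result
-- ===== SOURCE B (Python) =====
-- def task554(from_input):
--     # Descending-pointer: for each c, sweep b upward while a sweeps downward
--     # tracking floor(sqrt(c*c - b*b)); no inner scan, no dict.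
--     result = {}
--     key = 1
--     for c in range(from_input):
--         a = c
--         for b in range(c):
--             d = c * c - b * b
--             while a * a > d:
--                 a -= 1
--             if a * a == d and a < b:
--                 result[key] = [a, b, c]
--                 key += 1
--     return result
-- ===== Notes on version B (the rewrite author's own statement) =====
-- stated objective: faster
-- what changed: Replaces A's innermost scan over a with a descending pointer that tracks floor(sqrt(c^2-b^2)) as b rises, so each c costs amortized O(c) instead of O(c^2).
import Mathlib
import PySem

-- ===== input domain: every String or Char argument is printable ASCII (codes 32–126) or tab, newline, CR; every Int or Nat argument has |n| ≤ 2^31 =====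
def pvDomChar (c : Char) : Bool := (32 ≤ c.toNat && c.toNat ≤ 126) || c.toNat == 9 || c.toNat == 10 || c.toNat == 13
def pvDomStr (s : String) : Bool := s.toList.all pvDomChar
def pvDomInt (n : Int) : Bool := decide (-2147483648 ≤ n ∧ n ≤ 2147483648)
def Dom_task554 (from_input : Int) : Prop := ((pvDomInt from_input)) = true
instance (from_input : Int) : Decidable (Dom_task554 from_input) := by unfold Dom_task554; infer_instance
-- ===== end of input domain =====

-- B replaces A's innermost scan over a with a descending pointer tracking floor(sqrt(c*c-b*b)) as b rises: amortized O(n^2) vs O(n^3).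

-- ===== PORT A =====
def task554 (from_input : Int) : List (Int × List Int) :=
  (((PySem.List.pyRange 0 from_input 1).foldl (fun s c =>
      (PySem.List.pyRange 0 c 1).foldl (fun s b =>
        (PySem.List.pyRange 0 b 1).foldl (fun s a =>
          if c ^ 2 == a ^ 2 + b ^ 2 then (s.1.insert s.2 [a, b, c], s.2 + 1) else s) s) s)
    ((PySem.Dict.empty : PySem.Dict Int (List Int)), (1 : Int))).1).items

-- ===== PORT B =====
-- Python's 'while a * a > d: a -= 1'; the '0 < a' conjunct only makes the recursion
-- total (in every call d ≥ 0, where the loop anyway stops by a = 0 at the latest).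
def descend (a d : Int) : Int :=
  if h : 0 < a ∧ d < a * a then descend (a - 1) d else a
  termination_by a.toNat
  decreasing_by omega

def task554_alt (from_input : Int) : List (Int × List Int) :=
  (((PySem.List.pyRange 0 from_input 1).foldl (fun s c =>
      ((PySem.List.pyRange 0 c 1).foldl
        (fun (t : (PySem.Dict Int (List Int) × Int) × Int) b =>
          let d := c * c - b * b
          let a := descend t.2 d
          if a * a = d ∧ a < b then ((t.1.1.insert t.1.2 [a, b, c], t.1.2 + 1), a)
          else (t.1, a))
        (s, c)).1)
    ((PySem.Dict.empty : PySem.Dict Int (List Int)), (1 : Int))).1).items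

-- ===== PRECONDITION & SPEC =====
def Spec_task554 (from_input : Int) (out : List (Int × List Int)) : Prop := out = task554_alt from_input
instance (from_input : Int) (out : List (Int × List Int)) : Decidable (Spec_task554 from_input out) := by unfold Spec_task554; infer_instance

-- ===== CLAIM (what is proved, stated in full; the proofs are below) =====
def Claim_equal_task554 : Prop := ∀ (from_input : Int), Dom_task554 from_input → Spec_task554 from_input (task554 from_input)

-- ===== LEMMAS AND PROOFS =====

-- floor square root on Int (proof-side characterisation of what 'descend' computes)
def rsq (d : Int) : Int := ((d.toNat.sqrt : Nat) : Int)

theorem rsq_nonneg (d : Int) : 0 ≤ rsq d := Int.natCast_nonneg _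

theorem rsq_le (d : Int) (hd : 0 ≤ d) : rsq d * rsq d ≤ d := by
  have h := Nat.sqrt_le' d.toNat
  rw [pow_two] at h
  have : ((d.toNat.sqrt * d.toNat.sqrt : Nat) : Int) ≤ ((d.toNat : Nat) : Int) := by exact_mod_cast h
  rw [Int.toNat_of_nonneg hd] at this
  push_cast at this
  simpa [rsq] using this

theorem rsq_lt (d : Int) (hd : 0 ≤ d) : d < (rsq d + 1) * (rsq d + 1) := by
  have h := Nat.lt_succ_sqrt' d.toNat
  rw [pow_two, Nat.succ_eq_add_one] at h
  have : ((d.toNat : Nat) : Int) < (((d.toNat.sqrt + 1) * (d.toNat.sqrt + 1) : Nat) : Int) := by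
    exact_mod_cast h
  rw [Int.toNat_of_nonneg hd] at this
  push_cast at this
  simpa [rsq] using this

theorem rsq_mono {d1 d2 : Int} (h : d1 ≤ d2) : rsq d1 ≤ rsq d2 := by
  have := Nat.sqrt_le_sqrt (Int.toNat_le_toNat h)
  simp only [rsq]
  exact_mod_cast this

theorem descend_eq (d r : Int) (hr0 : 0 ≤ r) (hle : r * r ≤ d) (hlt : d < (r + 1) * (r + 1)) :
    ∀ a, r ≤ a → descend a d = r := by
  intro a ha
  induction a, ha using Int.le_induction with
  | base =>
    rw [descend, dif_neg (by omega : ¬(0 < r ∧ d < r * r))]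
  | succ a ha ih =>
    have h1 : 0 < a + 1 := by omega
    have h2 : d < (a + 1) * (a + 1) := by nlinarith
    rw [descend, dif_pos ⟨h1, h2⟩]
    have : a + 1 - 1 = a := by ring
    rw [this]; exact ih

theorem foldl_no_hit {α β : Type} (l : List α) (p : α → Bool) (g : β → α → β) (s : β)
    (h : ∀ a ∈ l, p a = false) :
    l.foldl (fun s a => if p a then g s a else s) s = s := by
  induction l generalizing s with
  | nil => rfl
  | cons a l ih =>
    simp only [List.foldl_cons, h a (List.mem_cons_self ..)]
    exact ih _ (fun a ha => h a (List.mem_cons_of_mem _ ha))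

theorem inner_loop_eq (c b : Int) (hb : 0 ≤ b) (hbc : b < c)
    (s : PySem.Dict Int (List Int) × Int) :
    (PySem.List.pyRange 0 b 1).foldl (fun s a =>
        if c ^ 2 == a ^ 2 + b ^ 2 then (s.1.insert s.2 [a, b, c], s.2 + 1) else s) s
    = (if rsq (c * c - b * b) * rsq (c * c - b * b) = c * c - b * b ∧ rsq (c * c - b * b) < b
       then (s.1.insert s.2 [rsq (c * c - b * b), b, c], s.2 + 1) else s) := by
  have hc : 0 ≤ c := by omega
  have hd : 0 ≤ c * c - b * b := by nlinarith
  have hr0 : 0 ≤ rsq (c * c - b * b) := rsq_nonneg _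
  have hle := rsq_le _ hd
  have hlt := rsq_lt _ hd
  have hcond : ∀ a : Int, (c ^ 2 == a ^ 2 + b ^ 2) = true ↔ a * a = c * c - b * b := by
    intro a; rw [beq_iff_eq]; constructor <;> intro h <;> nlinarith
  have huniq : ∀ a' : Int, 0 ≤ a' → a' * a' = c * c - b * b → a' = rsq (c * c - b * b) := by
    intro a' h0 h1
    by_contra hne
    rcases lt_or_gt_of_ne hne with h | h
    · nlinarith
    · nlinarith
  by_cases hcase : rsq (c * c - b * b) * rsq (c * c - b * b) = c * c - b * b ∧ rsq (c * c - b * b) < b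
  · obtain ⟨hr2, hrb⟩ := hcase
    rw [if_pos ⟨hr2, hrb⟩]
    rw [PySem.List.pyRange_one_append 0 (rsq (c * c - b * b)) b hr0 (by omega),
        PySem.List.pyRange_one_cons hrb, List.foldl_append, List.foldl_cons]
    rw [foldl_no_hit _ _ _ s (by
      intro a' ha'
      rw [PySem.List.mem_pyRange_one] at ha'
      cases h' : (c ^ 2 == a' ^ 2 + b ^ 2) with
      | false => rfl
      | true => have := huniq a' ha'.1 ((hcond a').mp h'); omega)]
    rw [if_pos ((hcond _).mpr hr2)]
    apply foldl_no_hit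
    intro a' ha'
    rw [PySem.List.mem_pyRange_one] at ha'
    cases h' : (c ^ 2 == a' ^ 2 + b ^ 2) with
    | false => rfl
    | true => have := huniq a' (by omega) ((hcond a').mp h'); omega
  · rw [if_neg hcase]
    apply foldl_no_hit
    intro a' ha'
    rw [PySem.List.mem_pyRange_one] at ha'
    cases h' : (c ^ 2 == a' ^ 2 + b ^ 2) with
    | false => rfl
    | true =>
      have heq := huniq a' ha'.1 ((hcond a').mp h')
      exact absurd ⟨by rw [← heq]; exact (hcond a').mp h', by omega⟩ hcase

theorem bloop_eq (c : Int) (hc : 0 ≤ c) :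
    ∀ (n : Nat) (b0 a0 : Int) (s : PySem.Dict Int (List Int) × Int),
      (c - b0).toNat = n → 0 ≤ b0 → b0 ≤ c → rsq (c * c - b0 * b0) ≤ a0 →
    (PySem.List.pyRange b0 c 1).foldl (fun s b =>
        (PySem.List.pyRange 0 b 1).foldl (fun s a =>
          if c ^ 2 == a ^ 2 + b ^ 2 then (s.1.insert s.2 [a, b, c], s.2 + 1) else s) s) s
    = ((PySem.List.pyRange b0 c 1).foldl
        (fun (t : (PySem.Dict Int (List Int) × Int) × Int) b =>
          let d := c * c - b * b
          let a := descend t.2 d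
          if a * a = d ∧ a < b then ((t.1.1.insert t.1.2 [a, b, c], t.1.2 + 1), a)
          else (t.1, a))
        (s, a0)).1 := by
  intro n
  induction n with
  | zero =>
    intro b0 a0 s hn h0 h1 h2
    rw [PySem.List.pyRange_one_eq_nil (by omega : c ≤ b0)]
    rfl
  | succ n ih =>
    intro b0 a0 s hn h0 h1 h2
    have hlt : b0 < c := by omega
    rw [PySem.List.pyRange_one_cons hlt]
    simp only [List.foldl_cons]
    have hd : 0 ≤ c * c - b0 * b0 := by nlinarith
    have hdes : descend a0 (c * c - b0 * b0) = rsq (c * c - b0 * b0) :=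
      descend_eq _ _ (rsq_nonneg _) (rsq_le _ hd) (rsq_lt _ hd) a0 h2
    rw [inner_loop_eq c b0 h0 hlt s]
    simp only [hdes]
    have hnext : rsq (c * c - (b0 + 1) * (b0 + 1)) ≤ rsq (c * c - b0 * b0) :=
      rsq_mono (by nlinarith)
    by_cases hcase : rsq (c * c - b0 * b0) * rsq (c * c - b0 * b0) = c * c - b0 * b0 ∧
        rsq (c * c - b0 * b0) < b0
    · rw [if_pos hcase, if_pos hcase]
      exact ih (b0 + 1) _ _ (by omega) (by omega) (by omega) hnext
    · rw [if_neg hcase, if_neg hcase]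
      exact ih (b0 + 1) _ _ (by omega) (by omega) (by omega) hnext

-- ===== VERDICT (by name: the statement is the Claim_ definition above) =====
theorem task554_spec : Claim_equal_task554 := by
  intro from_input _
  unfold Spec_task554 task554 task554_alt
  congr 2
  apply PySem.List.foldl_congr_mem
  intro s c hcmem
  rw [PySem.List.mem_pyRange_one] at hcmem
  have hc : 0 ≤ c := hcmem.1
  have hd : 0 ≤ c * c - 0 * 0 := by nlinarith
  have hinit : rsq (c * c - 0 * 0) ≤ c := by
    have h1 := rsq_le _ hd
    have h2 := rsq_lt _ hd
    have h0 := rsq_nonneg (c * c - 0 * 0)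
    nlinarith
  exact bloop_eq c hc (c - 0).toNat 0 c s rfl le_rfl hc hinit
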